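-- pv_equiv track=rewrite | github.com/AdaMartin18010/FormalAlgorithm | scripts/perform_merge.py | strip_main_title
-- ===== SOURCE A (Python) =====
-- def strip_main_title(content: str) -> str:
--     """移除文档的第一个主标题（# 或 ## 开头的标题行）"""
--     lines = content.splitlines()
--     result = []
--     title_removed = False
--     for line in lines:
--         if not title_removed and (line.startswith("# ") or line.startswith("## ")):
--             title_removed = True
--             continue
--         result.append(line)
--     return "\n".join(result).lstrip("\n")
-- ===== SOURCE B (Python) =====
-- def strip_main_title(content: str) -> str:
--     """移除文档的第一个主标题（# 或 ## 开头的标题行）"""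
--     # Work on one flat newline-normalized string instead of a list of lines:
--     # locate the first title line by substring search and splice it out.
--     s = "\n".join(content.splitlines())
--     if s.startswith("# ") or s.startswith("## "):
--         start = 0
--     else:
--         cands = [p + 1 for p in (s.find("\n# "), s.find("\n## ")) if p != -1]
--         start = min(cands) if cands else -1
--     if start != -1:
--         end = s.find("\n", start)
--         if end == -1:
--             s = s[:max(start - 1, 0)]
--         else:
--             s = s[:start] + s[end + 1:]
--     return s.lstrip("\n")
-- ===== Notes on version B (the rewrite author's own statement) =====
-- stated objective: alternative
-- what changed: B abandons the per-line flag loop: it joins the splitlines once into one newline-normalized string and then works purely at the string level, locating the first title line by substring searches (startswith / find of "\n# " and "\n## ") and splicing that line out with string slices before the final lstrip.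
import Mathlib
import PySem

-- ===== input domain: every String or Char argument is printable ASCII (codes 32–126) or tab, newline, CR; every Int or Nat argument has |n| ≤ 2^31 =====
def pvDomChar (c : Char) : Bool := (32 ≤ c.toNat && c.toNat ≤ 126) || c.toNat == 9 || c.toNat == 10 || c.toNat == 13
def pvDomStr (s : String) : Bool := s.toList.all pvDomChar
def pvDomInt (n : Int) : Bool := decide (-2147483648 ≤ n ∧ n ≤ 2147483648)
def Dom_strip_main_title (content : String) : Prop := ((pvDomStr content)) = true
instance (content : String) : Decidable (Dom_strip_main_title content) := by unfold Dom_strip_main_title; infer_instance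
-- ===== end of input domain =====

-- B replaces A's per-line flag loop over splitlines with substring search on one flat
-- newline-normalized string (find the first title line's char offset, splice it out); alternative, same cost.

-- s.lstrip("\n"): ported by hand (PySem.Str.lstrip strips all whitespace); exact:
-- Python's lstrip("\n") drops exactly the leading '\n' characters.
def pvLstripNL (s : String) : String :=
  String.ofList (s.toList.dropWhile (fun c => c == '\n'))

-- ===== PORT A =====
-- A's title-line test: line.startswith("# ") or line.startswith("## ")
def pvTitleS (l : String) : Bool :=
  PySem.Str.startswith l "# " || PySem.Str.startswith l "## "

-- A's loop body
def pvStepA (st : List String × Bool) (line : String) : List String × Bool :=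
  if !st.2 && pvTitleS line then (st.1, true)
  else (st.1 ++ [line], st.2)

def strip_main_title (content : String) : String :=
  let lines := PySem.Str.splitlines content
  let st := lines.foldl pvStepA ([], false)
  pvLstripNL (PySem.Str.join "\n" st.1)

-- ===== PORT B =====
-- Source B's 'start' computation: position 0 if s itself starts with a title marker, else
-- min over the two "\n"-anchored substring searches (−1 = not found), on code points.
def pvStartB (s : List Char) : Int :=
  if PySem.Chars.startswith s "# ".toList || PySem.Chars.startswith s "## ".toList then 0
  else
    let cands := ([PySem.Chars.find s "\n# ".toList, PySem.Chars.find s "\n## ".toList].filter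
        (fun p => decide (p ≠ -1))).map (fun p => p + 1)
    match PySem.List.min? cands (fun x => x) with
    | some m => m
    | none => -1

-- Source B's splice: if a title line starts at 'start', cut it out up to the next "\n"
def pvSpliceB (s : List Char) : List Char :=
  let start := pvStartB s
  if start ≠ -1 then
    let e := PySem.Chars.findFrom s "\n".toList start
    if e = -1 then PySem.List.slice s none (some (max (start - 1) 0))
    else PySem.List.slice s none (some start) ++ PySem.List.slice s (some (e + 1)) none
  else s

def strip_main_title_alt (content : String) : String :=
  let s := PySem.Str.join "\n" (PySem.Str.splitlines content)
  pvLstripNL (String.ofList (pvSpliceB s.toList))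

-- ===== PRECONDITION & SPEC =====
def Spec_strip_main_title (content : String) (out : String) : Prop := out = strip_main_title_alt content
instance (content : String) (out : String) : Decidable (Spec_strip_main_title content out) := by unfold Spec_strip_main_title; infer_instance

-- ===== CLAIM (what is proved, stated in full; the proofs are below) =====
def Claim_equal_strip_main_title : Prop := ∀ (content : String), Dom_strip_main_title content → Spec_strip_main_title content (strip_main_title content)

-- ===== LEMMAS AND PROOFS =====

-- a line is a title line (char level)
def pvTitleC (l : List Char) : Bool :=
  PySem.Chars.startswith l ['#', ' '] || PySem.Chars.startswith l ['#', '#', ' ']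

-- remove the first title line (what A's loop computes), both levels
def pvRemFirstS : List String → List String
  | [] => []
  | l :: t => if pvTitleS l then t else l :: pvRemFirstS t

def pvRemFirst : List (List Char) → List (List Char)
  | [] => []
  | l :: t => if pvTitleC l then t else l :: pvRemFirst t

-- char offset of the first title line in the "\n"-joined string (−1 = none)
def pvLineStart : List (List Char) → Int
  | [] => -1
  | l :: t => if pvTitleC l then 0
      else if pvLineStart t = -1 then -1 else (l.length : Int) + 1 + pvLineStart t

-- ---------- A-side: the flag loop removes the first title line ----------

theorem pvFoldl_true (ls : List String) (acc : List String) :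
    ls.foldl pvStepA (acc, true) = (acc ++ ls, true) := by
  induction ls generalizing acc with
  | nil => simp
  | cons l ls ih =>
      rw [List.foldl_cons, show pvStepA (acc, true) l = (acc ++ [l], true) by simp [pvStepA], ih]
      simp

theorem pvFoldl_false (ls : List String) (acc : List String) :
    (ls.foldl pvStepA (acc, false)).1 = acc ++ pvRemFirstS ls := by
  induction ls generalizing acc with
  | nil => simp [pvRemFirstS]
  | cons l ls ih =>
      by_cases h : pvTitleS l = true
      · rw [List.foldl_cons, show pvStepA (acc, false) l = (acc, true) by simp [pvStepA, h],
          pvFoldl_true]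
        simp [pvRemFirstS, h]
      · rw [List.foldl_cons,
          show pvStepA (acc, false) l = (acc ++ [l], false) by simp [pvStepA, h], ih]
        simp [pvRemFirstS, h]

theorem pvRemFirstS_map (ls : List String) :
    (pvRemFirstS ls).map String.toList = pvRemFirst (ls.map String.toList) := by
  induction ls with
  | nil => simp [pvRemFirstS, pvRemFirst]
  | cons l t ih =>
      have ht : pvTitleS l = pvTitleC l.toList := by
        simp [pvTitleS, pvTitleC, PySem.Str.startswith_eq]
      by_cases h : pvTitleS l = true <;>
        simp [pvRemFirstS, pvRemFirst, h, ← ht, ih]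

-- ---------- splitlines produces '\n'-free lines ----------

theorem pv_go_clean (isB : Char → Bool) (hn : isB '\n' = true) :
    ∀ (n : ℕ) (s cur acc : _), s.length ≤ n → '\n' ∉ cur → (∀ l ∈ acc, '\n' ∉ l) →
      ∀ l ∈ PySem.Chars.splitlines.go isB s cur acc, '\n' ∉ l := by
  intro n
  induction n with
  | zero =>
      intro s cur acc hlen hcur hacc l hl
      have hs : s = [] := List.eq_nil_of_length_eq_zero (Nat.le_zero.1 hlen)
      subst hs
      rw [PySem.Chars.splitlines.go.eq_def] at hl
      simp only [] at hl
      split at hl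
      · exact hacc l (by simpa using hl)
      · rcases (by simpa using hl : l ∈ acc ∨ l = cur.reverse) with h | h
        · exact hacc l h
        · subst h; simpa using hcur
  | succ n ih =>
      intro s cur acc hlen hcur hacc l hl
      rw [PySem.Chars.splitlines.go.eq_def] at hl
      split at hl
      · -- s = []
        split at hl
        · exact hacc l (by simpa using hl)
        · rcases (by simpa using hl : l ∈ acc ∨ l = cur.reverse) with h | h
          · exact hacc l h
          · subst h; simpa using hcur
      · -- s = '\r' :: '\n' :: rest
        rename_i rest
        refine ih rest [] (cur.reverse :: acc) (by simp at hlen; omega) (by simp) ?_ l hl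
        intro m hm
        rcases List.mem_cons.1 hm with h | h
        · subst h; simpa using hcur
        · exact hacc m h
      · -- s = c :: rest
        rename_i c rest hne
        split at hl
        · refine ih rest [] (cur.reverse :: acc) (by simp at hlen; omega) (by simp) ?_ l hl
          intro m hm
          rcases List.mem_cons.1 hm with h | h
          · subst h; simpa using hcur
          · exact hacc m h
        · rename_i hc
          refine ih rest (c :: cur) acc (by simp at hlen; omega) ?_ hacc l hl
          intro hmem
          rcases List.mem_cons.1 hmem with h | h
          · exact hc (by rw [← h]; exact hn)
          · exact hcur h

theorem pv_splitlines_clean (cs : List Char) :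
    ∀ l ∈ PySem.Chars.splitlines cs, '\n' ∉ l := by
  rw [PySem.Chars.splitlines]
  exact pv_go_clean _ (by decide) cs.length cs [] [] le_rfl (by simp) (by simp)

-- ---------- find / prefix toolbox ----------

theorem pv_prefix_append {p l : List Char} (r : List Char) (h : p <+: l) : p <+: l ++ r :=
  h.trans (List.prefix_append l r)

theorem pv_nopref {l : List Char} (hl : '\n' ∉ l) {i : ℕ} (hi : i < l.length)
    (q x : List Char) : ¬ ('\n' :: q) <+: (l ++ x).drop i := by
  intro h
  rw [List.drop_append_of_le_length hi.le] at h
  have h0 : 0 < (l.drop i).length := by simp; omega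
  have hg := h.getElem (i := 0) (by simp)
  rw [List.getElem_append_left h0] at hg
  simp [List.getElem_drop] at hg
  exact hl (hg ▸ List.getElem_mem (by omega))

theorem pv_not_prefix_append {p l : List Char} (hp : '\n' ∉ p) (hl : '\n' ∉ l)
    (hnpl : ¬ p <+: l) (r : List Char) : ¬ p <+: l ++ '\n' :: r := by
  intro h
  by_cases hlen : p.length ≤ l.length
  · exact hnpl (List.prefix_of_prefix_length_le h (List.prefix_append l _) hlen)
  · push_neg at hlen
    have hg := h.getElem (i := l.length) hlen
    rw [List.getElem_append_right (le_refl _)] at hg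
    simp at hg
    exact hp (hg ▸ List.getElem_mem hlen)

theorem pv_find_eq_coe {s pat : List Char} {n : ℕ} (h1 : pat <+: s.drop n)
    (h2 : ∀ i < n, ¬ pat <+: s.drop i) : PySem.Chars.find s pat = (n : Int) := by
  have hin : pat <:+: s :=
    (PySem.Chars.isIn_iff_infix _ _).1 ((PySem.Chars.exists_prefix_drop_iff_isIn _ _).1 ⟨n, h1⟩)
  have hf : 0 ≤ PySem.Chars.find s pat := (PySem.Chars.find_nonneg_iff s pat).2 hin
  obtain ⟨hf1, hf2⟩ := PySem.Chars.find_spec hf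
  have hle : (PySem.Chars.find s pat).toNat ≤ n := by
    by_contra hlt
    exact hf2 n (by omega) h1
  have hge : n ≤ (PySem.Chars.find s pat).toNat := by
    by_contra hlt
    exact h2 _ (by omega) hf1
  omega

theorem pv_find_none {s pat : List Char} (h : ∀ i, ¬ pat <+: s.drop i) :
    PySem.Chars.find s pat = -1 := by
  rw [PySem.Chars.find_eq_neg_one_iff]
  intro hin
  obtain ⟨j, hj⟩ := (PySem.Chars.exists_prefix_drop_iff_isIn pat s).2
    ((PySem.Chars.isIn_iff_infix pat s).2 hin)
  exact h j hj

theorem pv_find_no_nl {l pat : List Char} (hl : '\n' ∉ l) (hp : '\n' ∈ pat) :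
    PySem.Chars.find l pat = -1 := by
  rw [PySem.Chars.find_eq_neg_one_iff]
  intro hin
  exact hl (hin.mem hp)

theorem pv_find_nl (l r : List Char) (hl : '\n' ∉ l) :
    PySem.Chars.find (l ++ '\n' :: r) ['\n'] = (l.length : Int) := by
  apply pv_find_eq_coe (n := l.length)
  · rw [List.drop_left]
    exact ⟨r, rfl⟩
  · intro i hi
    exact pv_nopref hl hi [] _

theorem pv_find_shift (l r q : List Char) (hl : '\n' ∉ l) :
    PySem.Chars.find (l ++ '\n' :: r) ('\n' :: q) =
      if PySem.Chars.find ('\n' :: r) ('\n' :: q) = -1 then -1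
      else (l.length : Int) + PySem.Chars.find ('\n' :: r) ('\n' :: q) := by
  by_cases hc : PySem.Chars.find ('\n' :: r) ('\n' :: q) = -1
  · rw [if_pos hc]
    apply pv_find_none
    intro i
    by_cases hi : i < l.length
    · exact pv_nopref hl hi q _
    · intro h
      rw [List.drop_append, List.drop_eq_nil_of_le (by omega), List.nil_append] at h
      exact ((PySem.Chars.find_eq_neg_one_iff _ _).1 hc)
        ((PySem.Chars.isIn_iff_infix _ _).1
          ((PySem.Chars.exists_prefix_drop_iff_isIn _ _).1 ⟨_, h⟩))
  · have hf0 : 0 ≤ PySem.Chars.find ('\n' :: r) ('\n' :: q) := by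
      have := PySem.Chars.neg_one_le_find ('\n' :: r) ('\n' :: q)
      omega
    obtain ⟨h1, h2⟩ := PySem.Chars.find_spec hf0
    rw [if_neg hc]
    have heq : PySem.Chars.find (l ++ '\n' :: r) ('\n' :: q)
        = ((l.length + (PySem.Chars.find ('\n' :: r) ('\n' :: q)).toNat : ℕ) : Int) := by
      apply pv_find_eq_coe
      · rw [List.drop_append, List.drop_eq_nil_of_le (by omega), List.nil_append,
          Nat.add_sub_cancel_left]
        exact h1
      · intro i hi
        by_cases hil : i < l.length
        · exact pv_nopref hl hil q _
        · intro h
          rw [List.drop_append, List.drop_eq_nil_of_le (by omega), List.nil_append] at h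
          exact h2 (i - l.length) (by omega) h
    rw [heq]
    omega

theorem pv_cons_prefix {c : Char} {q r : List Char} : (c :: q <+: c :: r) ↔ q <+: r := by
  constructor
  · rintro ⟨t, ht⟩
    exact ⟨t, by simpa using ht⟩
  · rintro ⟨t, ht⟩
    exact ⟨t, by simp [← ht]⟩

theorem pv_find_cons_nl (r q : List Char) :
    PySem.Chars.find ('\n' :: r) ('\n' :: q) =
      if q <+: r then 0
      else if PySem.Chars.find r ('\n' :: q) = -1 then -1
      else 1 + PySem.Chars.find r ('\n' :: q) := by
  by_cases hq : q <+: r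
  · rw [if_pos hq]
    have : PySem.Chars.find ('\n' :: r) ('\n' :: q) = ((0 : ℕ) : Int) := by
      apply pv_find_eq_coe
      · simpa using (pv_cons_prefix (c := '\n')).mpr hq
      · omega
    simpa using this
  · rw [if_neg hq]
    by_cases hf : PySem.Chars.find r ('\n' :: q) = -1
    · rw [if_pos hf]
      apply pv_find_none
      intro i
      cases i with
      | zero =>
          intro h
          exact hq ((pv_cons_prefix (c := '\n')).mp (by simpa using h))
      | succ j =>
          intro h
          have h' : ('\n' :: q) <+: r.drop j := by simpa using h
          exact ((PySem.Chars.find_eq_neg_one_iff _ _).1 hf)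
            ((PySem.Chars.isIn_iff_infix _ _).1
              ((PySem.Chars.exists_prefix_drop_iff_isIn _ _).1 ⟨j, h'⟩))
    · rw [if_neg hf]
      have hf0 : 0 ≤ PySem.Chars.find r ('\n' :: q) := by
        have := PySem.Chars.neg_one_le_find r ('\n' :: q)
        omega
      obtain ⟨h1, h2⟩ := PySem.Chars.find_spec hf0
      have heq : PySem.Chars.find ('\n' :: r) ('\n' :: q)
          = (((PySem.Chars.find r ('\n' :: q)).toNat + 1 : ℕ) : Int) := by
        apply pv_find_eq_coe
        · simpa using h1
        · intro i hi
          cases i with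
          | zero =>
              intro h
              exact hq ((pv_cons_prefix (c := '\n')).mp (by simpa using h))
          | succ j =>
              intro h
              exact h2 j (by omega) (by simpa using h)
      rw [heq]
      omega

-- ---------- pvStartB characterization ----------

theorem pv_sw_decide (s p : List Char) :
    PySem.Chars.startswith s p = decide (p <+: s) := by
  by_cases h : p <+: s
  · simp [h, (PySem.Chars.startswith_iff s p).2 h]
  · simp only [h, decide_false]
    rw [Bool.eq_false_iff]
    intro hh
    exact h ((PySem.Chars.startswith_iff s p).1 hh)

theorem pvStartB_eq (s : List Char) :
    pvStartB s =
      if (PySem.Chars.startswith s ['#', ' '] || PySem.Chars.startswith s ['#', '#', ' ']) = true then 0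
      else
        (if PySem.Chars.find s ['\n', '#', ' '] = -1 then
          (if PySem.Chars.find s ['\n', '#', '#', ' '] = -1 then -1
           else PySem.Chars.find s ['\n', '#', '#', ' '] + 1)
         else if PySem.Chars.find s ['\n', '#', '#', ' '] = -1 then PySem.Chars.find s ['\n', '#', ' '] + 1
         else min (PySem.Chars.find s ['\n', '#', ' ']) (PySem.Chars.find s ['\n', '#', '#', ' ']) + 1) := by
  unfold pvStartB
  rw [show ("# ".toList : List Char) = ['#', ' '] from rfl,
    show ("## ".toList : List Char) = ['#', '#', ' '] from rfl,
    show ("\n# ".toList : List Char) = ['\n', '#', ' '] from rfl,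
    show ("\n## ".toList : List Char) = ['\n', '#', '#', ' '] from rfl]
  by_cases hsw : (PySem.Chars.startswith s ['#', ' '] || PySem.Chars.startswith s ['#', '#', ' ']) = true
  · rw [if_pos hsw, if_pos hsw]
  · rw [if_neg hsw, if_neg hsw]
    by_cases hx : PySem.Chars.find s ['\n', '#', ' '] = -1 <;>
      by_cases hy : PySem.Chars.find s ['\n', '#', '#', ' '] = -1
    · rw [if_pos hx, if_pos hy, hx, hy]
      rfl
    · rw [if_pos hx, if_neg hy, hx]
      simp [hy, PySem.List.min?_id_cons]
    · rw [if_neg hx, if_pos hy, hy]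
      simp [hx, PySem.List.min?_id_cons]
    · rw [if_neg hx, if_neg hy]
      have hfx : (decide ¬(PySem.Chars.find s ['\n', '#', ' '] = -1)) = true := by simp [hx]
      have hfy : (decide ¬(PySem.Chars.find s ['\n', '#', '#', ' '] = -1)) = true := by simp [hy]
      simp only [List.filter_cons, List.filter_nil, hfx, hfy, if_true, List.map_cons,
        List.map_nil, PySem.List.min?_id_cons, List.foldl_cons, List.foldl_nil]
      omega

-- ---------- pvStartB on joins ----------

theorem pv_start_nil : pvStartB [] = -1 := by decide

theorem pv_start_single (l : List Char) (hl : '\n' ∉ l) :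
    pvStartB l = if pvTitleC l then 0 else -1 := by
  rw [pvStartB_eq]
  have h1 : PySem.Chars.find l ['\n', '#', ' '] = -1 := pv_find_no_nl hl (by decide)
  have h2 : PySem.Chars.find l ['\n', '#', '#', ' '] = -1 := pv_find_no_nl hl (by decide)
  by_cases ht : (PySem.Chars.startswith l ['#', ' '] || PySem.Chars.startswith l ['#', '#', ' ']) = true
  · rw [if_pos ht]
    have htc : pvTitleC l = true := ht
    rw [htc]
    rfl
  · rw [if_neg ht]
    have htc : pvTitleC l = false := Bool.eq_false_iff.2 ht
    rw [htc, h1, h2]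
    simp

theorem pv_start_cons_title (l r : List Char) (ht : pvTitleC l = true) :
    pvStartB (l ++ r) = 0 := by
  rw [pvStartB_eq]
  unfold pvTitleC at ht
  have ht' : PySem.Chars.startswith l ['#', ' '] = true ∨ PySem.Chars.startswith l ['#', '#', ' '] = true := by
    simpa using ht
  have hsw : (PySem.Chars.startswith (l ++ r) ['#', ' ']
      || PySem.Chars.startswith (l ++ r) ['#', '#', ' ']) = true := by
    rcases ht' with h | h
    · have := (PySem.Chars.startswith_iff _ _).2
        (pv_prefix_append r ((PySem.Chars.startswith_iff _ _).1 h))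
      simp [this]
    · have := (PySem.Chars.startswith_iff _ _).2
        (pv_prefix_append r ((PySem.Chars.startswith_iff _ _).1 h))
      simp [this]
  rw [if_pos hsw]

set_option maxHeartbeats 2000000 in
theorem pv_start_cons (l J : List Char) (hl : '\n' ∉ l) (hnt : pvTitleC l = false) :
    pvStartB (l ++ '\n' :: J) =
      if pvStartB J = -1 then -1 else (l.length : Int) + 1 + pvStartB J := by
  unfold pvTitleC at hnt
  rw [pv_sw_decide, pv_sw_decide, Bool.or_eq_false_iff] at hnt
  obtain ⟨d1, d2⟩ := hnt
  have hp1 : ¬ (['#', ' '] <+: l) := by simpa using d1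
  have hp2 : ¬ (['#', '#', ' '] <+: l) := by simpa using d2
  have hsw1 : PySem.Chars.startswith (l ++ '\n' :: J) ['#', ' '] = false := by
    rw [pv_sw_decide, decide_eq_false_iff_not]
    exact pv_not_prefix_append (by decide) hl hp1 J
  have hsw2 : PySem.Chars.startswith (l ++ '\n' :: J) ['#', '#', ' '] = false := by
    rw [pv_sw_decide, decide_eq_false_iff_not]
    exact pv_not_prefix_append (by decide) hl hp2 J
  have hX : PySem.Chars.find (l ++ '\n' :: J) ['\n', '#', ' '] =
      if PySem.Chars.find ('\n' :: J) ('\n' :: ['#', ' ']) = -1 then -1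
      else (l.length : Int) + PySem.Chars.find ('\n' :: J) ('\n' :: ['#', ' ']) :=
    pv_find_shift l J ['#', ' '] hl
  have hY : PySem.Chars.find (l ++ '\n' :: J) ['\n', '#', '#', ' '] =
      if PySem.Chars.find ('\n' :: J) ('\n' :: ['#', '#', ' ']) = -1 then -1
      else (l.length : Int) + PySem.Chars.find ('\n' :: J) ('\n' :: ['#', '#', ' ']) :=
    pv_find_shift l J ['#', '#', ' '] hl
  have hA := pv_find_cons_nl J ['#', ' ']
  have hB := pv_find_cons_nl J ['#', '#', ' ']
  have hf1 : -1 ≤ PySem.Chars.find J ('\n' :: ['#', ' ']) := PySem.Chars.neg_one_le_find _ _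
  have hf2 : -1 ≤ PySem.Chars.find J ('\n' :: ['#', '#', ' ']) := PySem.Chars.neg_one_le_find _ _
  rw [pvStartB_eq, pvStartB_eq, hsw1, hsw2, hX, hY, hA, hB, pv_sw_decide, pv_sw_decide]
  by_cases hs1 : ['#', ' '] <+: J <;> by_cases hs2 : ['#', '#', ' '] <+: J <;>
    simp only [hs1, hs2, decide_true, decide_false, Bool.or_self, Bool.or_true, Bool.true_or,
      Bool.false_or, Bool.or_false, Bool.false_eq_true, if_true, if_false, min_def] <;>
      split_ifs <;> first | omega | (exfalso; assumption)

-- ---------- the char offset of the first title line ----------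

theorem pv_loc (L : List (List Char)) (hc : ∀ l ∈ L, '\n' ∉ l) :
    pvStartB (PySem.Chars.join ['\n'] L) = pvLineStart L := by
  induction L with
  | nil => rw [PySem.Chars.join_nil]; simp [pvLineStart, pv_start_nil]
  | cons l t ih =>
      have hl : '\n' ∉ l := hc l (by simp)
      cases t with
      | nil =>
          rw [PySem.Chars.join_singleton, pv_start_single l hl]
          simp [pvLineStart]
      | cons h t' =>
          rw [show PySem.Chars.join ['\n'] (l :: h :: t')
              = l ++ '\n' :: PySem.Chars.join ['\n'] (h :: t') by
            rw [PySem.Chars.join_cons_cons]; simp]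
          by_cases ht : pvTitleC l = true
          · rw [pv_start_cons_title _ _ ht]; simp [pvLineStart, ht]
          · have ht' : pvTitleC l = false := by simpa using ht
            rw [pv_start_cons l _ hl ht', ih (fun m hm => hc m (by simp [hm]))]
            simp [pvLineStart, ht']

theorem pv_lineStart_nonneg (L : List (List Char)) :
    pvLineStart L = -1 ∨ 0 ≤ pvLineStart L := by
  induction L with
  | nil => left; rfl
  | cons l t ih =>
      simp only [pvLineStart]
      split_ifs with h1 h2
      · right; omega
      · left; rfl
      · rcases ih with h | h
        · exact absurd h h2
        · right; omega

theorem pv_remFirst_of_none (L : List (List Char)) (h : pvLineStart L = -1) :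
    pvRemFirst L = L := by
  induction L with
  | nil => rfl
  | cons l t ih =>
      by_cases h1 : pvTitleC l = true
      · simp [pvLineStart, h1] at h
      · have h1' : pvTitleC l = false := by simpa using h1
        simp only [pvLineStart, h1', Bool.false_eq_true, if_false] at h
        simp only [pvRemFirst, h1', Bool.false_eq_true, if_false]
        split_ifs at h with h2
        · rw [ih h2]
        · rcases pv_lineStart_nonneg t with h3 | h3
          · exact absurd h3 h2
          · omega

theorem pv_lineStart_le (L : List (List Char)) (hc : ∀ l ∈ L, '\n' ∉ l) :
    pvLineStart L ≤ ((PySem.Chars.join ['\n'] L).length : Int) := by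
  induction L with
  | nil => simp [pvLineStart]
  | cons l t ih =>
      cases t with
      | nil =>
          rw [PySem.Chars.join_singleton]
          simp only [pvLineStart]
          split_ifs <;> omega
      | cons h t' =>
          have hlen : ((PySem.Chars.join ['\n'] (l :: h :: t')).length : Int)
              = (l.length : Int) + 1 + ((PySem.Chars.join ['\n'] (h :: t')).length : Int) := by
            rw [PySem.Chars.join_cons_cons]
            simp
            omega
          have iht := ih (fun m hm => hc m (by simp [hm]))
          rw [hlen]
          show (if pvTitleC l then 0
              else if pvLineStart (h :: t') = -1 then -1
              else (l.length : Int) + 1 + pvLineStart (h :: t')) ≤ _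
          split_ifs <;> omega

theorem pv_lineStart_zero (h : List Char) (t' : List (List Char))
    (hz : pvLineStart (h :: t') = 0) : pvTitleC h = true := by
  by_cases h1 : pvTitleC h = true
  · exact h1
  · exfalso
    have h1' : pvTitleC h = false := by simpa using h1
    simp only [pvLineStart, h1', Bool.false_eq_true, if_false] at hz
    rcases pv_lineStart_nonneg t' with h3 | h3
    · simp [h3] at hz
    · split_ifs at hz <;> omega

theorem pv_lineStart_pos (h : List Char) (t' : List (List Char))
    (hz : 0 < pvLineStart (h :: t')) : pvTitleC h = false := by
  by_cases h1 : pvTitleC h = true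
  · simp [pvLineStart, h1] at hz
  · simpa using h1

-- ---------- '\n' is where the separators are ----------

theorem pv_main (L : List (List Char)) (hc : ∀ l ∈ L, '\n' ∉ l) :
    pvSpliceB (PySem.Chars.join ['\n'] L) = PySem.Chars.join ['\n'] (pvRemFirst L) := by
  induction L with
  | nil =>
      rw [PySem.Chars.join_nil, show pvRemFirst [] = [] from rfl, PySem.Chars.join_nil]
      simp [pvSpliceB, pv_start_nil]
  | cons l t ih =>
      have hl : '\n' ∉ l := hc l (by simp)
      cases t with
      | nil =>
          rw [PySem.Chars.join_singleton]
          by_cases ht : pvTitleC l = true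
          · have hstart : pvStartB l = 0 := by rw [pv_start_single l hl, ht]; rfl
            have hfe : PySem.Chars.findFrom l "\n".toList 0 = -1 := by
              rw [PySem.Chars.findFrom_zero]
              exact pv_find_no_nl hl (by decide)
            simp only [pvSpliceB, hstart, hfe]
            simp only [reduceIte]
            rw [show (max (0 - 1 : Int) 0) = 0 from by norm_num,
              PySem.List.slice_to _ (le_refl (0:Int))]
            simp [pvRemFirst, ht, PySem.Chars.join_nil]
          · have ht' : pvTitleC l = false := by simpa using ht
            have hstart : pvStartB l = -1 := by rw [pv_start_single l hl, ht']; rfl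
            simp only [pvSpliceB, hstart]
            rw [if_neg (by norm_num : ¬((-1:Int) ≠ -1)),
              show pvRemFirst [l] = [l] from by simp [pvRemFirst, ht'],
              PySem.Chars.join_singleton]
      | cons h t' =>
          have hcs : PySem.Chars.join ['\n'] (l :: h :: t')
              = l ++ '\n' :: PySem.Chars.join ['\n'] (h :: t') := by
            rw [PySem.Chars.join_cons_cons]; simp
          have hct : ∀ m ∈ (h :: t'), '\n' ∉ m := fun m hm => hc m (by simp [hm])
          rw [hcs]
          set J := PySem.Chars.join ['\n'] (h :: t') with hJdef
          by_cases ht : pvTitleC l = true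
          · have hstart : pvStartB (l ++ '\n' :: J) = 0 := pv_start_cons_title _ _ ht
            have hfe : PySem.Chars.findFrom (l ++ '\n' :: J) "\n".toList 0 = (l.length : Int) := by
              rw [PySem.Chars.findFrom_zero, show ("\n".toList : List Char) = ['\n'] from rfl]
              exact pv_find_nl l _ hl
            simp only [pvSpliceB, hstart, hfe]
            rw [if_pos (by norm_num : (0:Int) ≠ -1), if_neg (by omega : ¬((l.length : Int) = -1)),
              PySem.List.slice_to _ (le_refl (0:Int)),
              show ((l.length : Int) + 1) = ((l.length + 1 : ℕ) : Int) from by push_cast; ring,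
              PySem.List.slice_from_natCast,
              show pvRemFirst (l :: h :: t') = h :: t' from by simp [pvRemFirst, ht],
              List.drop_append, List.drop_eq_nil_of_le (by omega),
              show l.length + 1 - l.length = 0 + 1 from by omega, List.drop_succ_cons]
            simpa using hJdef.symm
          · have ht' : pvTitleC l = false := by simpa using ht
            have hstart := pv_start_cons l J hl ht'
            have hloc : pvStartB J = pvLineStart (h :: t') := pv_loc _ hct
            have ihJ := ih hct
            by_cases hv : pvStartB J = -1
            · rw [hv, if_pos rfl] at hstart
              simp only [pvSpliceB, hstart]
              rw [if_neg (by norm_num : ¬((-1:Int) ≠ -1)),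
                show pvRemFirst (l :: h :: t') = l :: pvRemFirst (h :: t') from by
                  simp [pvRemFirst, ht'],
                pv_remFirst_of_none (h :: t') (by rw [← hloc]; exact hv), hcs]
            · have hv0 : 0 ≤ pvStartB J := by
                rcases pv_lineStart_nonneg (h :: t') with hn | hn
                · exact absurd (hloc.trans hn) hv
                · rw [hloc]; exact hn
              obtain ⟨w, hvw⟩ : ∃ w : ℕ, pvStartB J = (w : Int) :=
                ⟨(pvStartB J).toNat, by omega⟩
              have hwle : w ≤ J.length := by
                have hle := pv_lineStart_le (h :: t') hct
                rw [← hloc, ← hJdef] at hle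
                omega
              rw [hvw, if_neg (by omega : ¬((w : Int) = -1))] at hstart
              have hdropcs : (l ++ '\n' :: J).drop (l.length + 1 + w) = J.drop w := by
                rw [List.drop_append, List.drop_eq_nil_of_le (by omega), List.nil_append,
                  show l.length + 1 + w - l.length = w + 1 from by omega, List.drop_succ_cons]
              have hstart' : pvStartB (l ++ '\n' :: J) = ((l.length + 1 + w : ℕ) : Int) := by
                rw [hstart]; push_cast; ring
              have he : PySem.Chars.findFrom (l ++ '\n' :: J) "\n".toList ((l.length + 1 + w : ℕ) : Int)
                  = if PySem.Chars.find (J.drop w) ['\n'] = -1 then -1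
                    else ((l.length + 1 + w : ℕ) : Int) + PySem.Chars.find (J.drop w) ['\n'] := by
                rw [show ("\n".toList : List Char) = ['\n'] from rfl,
                  PySem.Chars.findFrom_natCast _ _ _ (by simp; omega), hdropcs]
              have heJ : PySem.Chars.findFrom J "\n".toList ((w : ℕ) : Int)
                  = if PySem.Chars.find (J.drop w) ['\n'] = -1 then -1
                    else ((w : ℕ) : Int) + PySem.Chars.find (J.drop w) ['\n'] := by
                rw [show ("\n".toList : List Char) = ['\n'] from rfl]
                exact PySem.Chars.findFrom_natCast _ _ _ hwle
              simp only [pvSpliceB, hvw, heJ] at ihJ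
              rw [if_pos (by omega : ((w:ℕ) : Int) ≠ -1)] at ihJ
              simp only [pvSpliceB, hstart', he]
              rw [if_pos (by omega : ((l.length + 1 + w : ℕ) : Int) ≠ -1)]
              rw [show pvRemFirst (l :: h :: t') = l :: pvRemFirst (h :: t') from by
                simp [pvRemFirst, ht']]
              by_cases hg : PySem.Chars.find (J.drop w) ['\n'] = -1
              · rw [if_pos hg, if_pos (show (-1:Int) = -1 from rfl)]
                rw [if_pos hg, if_pos (show (-1:Int) = -1 from rfl)] at ihJ
                rw [show max (((l.length + 1 + w : ℕ) : Int) - 1) 0 = ((l.length + w : ℕ) : Int)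
                    from by rw [max_eq_left (by push_cast; omega)]; push_cast; ring,
                  PySem.List.slice_to_natCast, List.take_append,
                  List.take_of_length_le (by omega : l.length ≤ l.length + w),
                  show l.length + w - l.length = w from by omega]
                by_cases hw0 : w = 0
                · subst hw0
                  have ht'nil : t' = [] := by
                    cases t' with
                    | nil => rfl
                    | cons a tt =>
                        exfalso
                        have hfj : PySem.Chars.find (J.drop 0) ['\n'] = (h.length : Int) := by
                          rw [List.drop_zero, hJdef,
                            show PySem.Chars.join ['\n'] (h :: a :: tt)
                              = h ++ '\n' :: PySem.Chars.join ['\n'] (a :: tt) from by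
                              rw [PySem.Chars.join_cons_cons]; simp]
                          exact pv_find_nl h _ (hct h (by simp))
                        rw [hfj] at hg
                        omega
                  have hth : pvTitleC h = true :=
                    pv_lineStart_zero h t' (by rw [← hloc, hvw]; rfl)
                  subst ht'nil
                  rw [show pvRemFirst (h :: ([] : List (List Char))) = [] from by
                    simp [pvRemFirst, hth], PySem.Chars.join_singleton]
                  simp
                · have hth : pvTitleC h = false :=
                    pv_lineStart_pos h t' (by rw [← hloc, hvw]; omega)
                  rw [show max (((w : ℕ) : Int) - 1) 0 = ((w - 1 : ℕ) : Int) from by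
                      rw [max_eq_left (by omega)]; push_cast; omega,
                    PySem.List.slice_to_natCast] at ihJ
                  have hrem : pvRemFirst (h :: t') = h :: pvRemFirst t' := by
                    simp [pvRemFirst, hth]
                  rw [hrem, PySem.Chars.join_cons_cons, ← hrem, ← ihJ]
                  obtain ⟨k, rfl⟩ : ∃ k, w = k + 1 := ⟨w - 1, by omega⟩
                  rw [List.take_succ_cons]
                  simp
              · rw [if_neg hg]
                rw [if_neg hg] at ihJ
                have hg0 : 0 ≤ PySem.Chars.find (J.drop w) ['\n'] := by
                  have := PySem.Chars.neg_one_le_find (J.drop w) ['\n']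
                  omega
                obtain ⟨m, hgm⟩ : ∃ m : ℕ, PySem.Chars.find (J.drop w) ['\n'] = (m : Int) :=
                  ⟨(PySem.Chars.find (J.drop w) ['\n']).toNat, by omega⟩
                rw [hgm, if_neg (show ¬(((w:ℕ) : Int) + (m : Int) = -1) from by omega)] at ihJ
                rw [hgm, if_neg (show ¬(((l.length + 1 + w : ℕ) : Int) + (m : Int) = -1) from by
                  omega)]
                rw [show ((w : ℕ) : Int) + (m : Int) + 1 = ((w + m + 1 : ℕ) : Int) from by
                    push_cast; ring,
                  PySem.List.slice_to_natCast, PySem.List.slice_from_natCast] at ihJ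
                rw [show ((l.length + 1 + w : ℕ) : Int) + (m : Int) + 1
                      = ((l.length + 1 + w + m + 1 : ℕ) : Int) from by push_cast; ring,
                  PySem.List.slice_to_natCast, PySem.List.slice_from_natCast,
                  List.take_append, List.take_of_length_le (by omega : l.length ≤ l.length + 1 + w),
                  show l.length + 1 + w - l.length = w + 1 from by omega, List.take_succ_cons,
                  List.drop_append, List.drop_eq_nil_of_le (by omega), List.nil_append,
                  show l.length + 1 + w + m + 1 - l.length = (w + m + 1) + 1 from by omega,
                  List.drop_succ_cons]
                have hne : pvRemFirst (h :: t') ≠ [] := by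
                  by_cases hth : pvTitleC h = true
                  · cases t' with
                    | nil =>
                        exfalso
                        have hJh : J = h := by rw [hJdef, PySem.Chars.join_singleton]
                        have hnin : '\n' ∉ J.drop w := by
                          rw [hJh]
                          intro hm
                          exact (hct h (by simp)) (List.drop_subset _ _ hm)
                        exact hg (pv_find_no_nl hnin (by decide))
                    | cons a tt => simp [pvRemFirst, hth]
                  · have hth' : pvTitleC h = false := by simpa using hth
                    simp [pvRemFirst, hth']
                obtain ⟨r1, rs, hr⟩ : ∃ r1 rs, pvRemFirst (h :: t') = r1 :: rs := by
                  cases hx : pvRemFirst (h :: t') with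
                  | nil => exact absurd hx hne
                  | cons r1 rs => exact ⟨r1, rs, rfl⟩
                rw [hr, PySem.Chars.join_cons_cons, ← hr, ← ihJ]
                simp

-- ===== final assembly =====

theorem pv_assemble (content : String) :
    strip_main_title content = strip_main_title_alt content := by
  unfold strip_main_title strip_main_title_alt
  have hA : (List.foldl pvStepA ([], false) (PySem.Str.splitlines content)).1
      = pvRemFirstS (PySem.Str.splitlines content) := by
    simpa using pvFoldl_false (PySem.Str.splitlines content) []
  have key : (PySem.Str.join "\n" (pvRemFirstS (PySem.Str.splitlines content))).toList
      = (String.ofList (pvSpliceB (PySem.Str.join "\n" (PySem.Str.splitlines content)).toList)).toList := by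
    rw [String.toList_ofList, PySem.Str.toList_join, PySem.Str.toList_join,
      show ("\n".toList : List Char) = ['\n'] from rfl, pvRemFirstS_map,
      PySem.Str.splitlines_map_toList]
    exact (pv_main (PySem.Chars.splitlines content.toList)
      (pv_splitlines_clean content.toList)).symm
  show pvLstripNL (PySem.Str.join "\n"
      (List.foldl pvStepA ([], false) (PySem.Str.splitlines content)).1)
    = pvLstripNL (String.ofList (pvSpliceB
      (PySem.Str.join "\n" (PySem.Str.splitlines content)).toList))
  rw [hA]
  unfold pvLstripNL
  rw [key]

-- ===== VERDICT (by name: the statement is the Claim_ definition above) =====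
theorem strip_main_title_spec : Claim_equal_strip_main_title := by
  intro content _
  exact pv_assemble content
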